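-- pv_equiv track=rewrite | github.com/stepanmracek/translatorCompareTools | compareCommon.py | checkDictKeys
-- ===== SOURCE A (Python) =====
-- def checkDictKeys(dicts):
-- 	keys = []
-- 	for d in dicts:
-- 		keys.append(d.keys())
--
-- 	for k in keys:
-- 		if not (keys[0] == k):
-- 			return False
--
-- 	return True
-- ===== SOURCE B (Python) =====
-- def checkDictKeys(dicts):
-- 	return len({frozenset(d.keys()) for d in dicts}) <= 1
-- ===== Notes on version B (the rewrite author's own statement) =====
-- stated objective: idiomatic
-- what changed: Replaces the build-a-list-of-key-views-then-compare-each-to-the-first loop by a one-line set comprehension that collects the distinct frozensets of keys and checks there is at most one.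
import Mathlib
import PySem

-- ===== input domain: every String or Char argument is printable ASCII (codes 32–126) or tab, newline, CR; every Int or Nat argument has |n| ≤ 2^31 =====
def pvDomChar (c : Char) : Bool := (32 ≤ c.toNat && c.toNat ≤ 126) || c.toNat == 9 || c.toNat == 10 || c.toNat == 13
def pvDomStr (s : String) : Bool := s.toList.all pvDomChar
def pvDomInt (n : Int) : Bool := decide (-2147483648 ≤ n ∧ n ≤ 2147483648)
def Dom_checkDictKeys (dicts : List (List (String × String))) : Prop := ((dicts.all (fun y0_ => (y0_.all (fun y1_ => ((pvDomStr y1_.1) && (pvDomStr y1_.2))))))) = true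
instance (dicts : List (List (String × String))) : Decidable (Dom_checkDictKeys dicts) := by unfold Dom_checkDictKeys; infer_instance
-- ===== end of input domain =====

-- B swaps A's collect-key-views-then-compare-each-to-the-first loop for a one-line
-- "collect the distinct frozensets of keys, check there is at most one" (idiomatic, same cost).

-- ===== PORT A =====
-- d.keys(): the dict's distinct keys in first-insertion order (a Python dict view).
def pvKeysOf (d : List (String × String)) : PySem.Set String :=
  PySem.Set.ofList (d.map Prod.fst)

-- the second loop: 'for k in keys: if not (keys[0] == k): return False'
-- (dict-view '==' is set equality: PySem.Set.equal)
def pvLoopA (k0 : PySem.Set String) : List (PySem.Set String) → Bool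
  | [] => true
  | k :: rest => if !(PySem.Set.equal k0 k) then false else pvLoopA k0 rest

def checkDictKeys (dicts : List (List (String × String))) : Bool :=
  let keys := dicts.foldl (fun acc d => acc ++ [pvKeysOf d]) []
  match keys with
  | [] => true            -- the loop body never runs; keys[0] is never evaluated
  | k0 :: _ => pvLoopA k0 keys

-- ===== PORT B =====
-- frozenset(d.keys()) ported by hand as its canonical representative: the sorted list
-- of the dict's distinct keys (exact: two frozensets are equal iff these lists are equal).
def pvFrozenKeys (d : List (String × String)) : List String :=
  PySem.List.sorted (PySem.Set.ofList (d.map Prod.fst)) (fun x => x) false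

def checkDictKeys_alt (dicts : List (List (String × String))) : Bool :=
  decide (PySem.Set.len (PySem.Set.ofList (dicts.map pvFrozenKeys)) ≤ 1)

-- ===== PRECONDITION & SPEC =====
def Spec_checkDictKeys (dicts : List (List (String × String))) (out : Bool) : Prop := out = checkDictKeys_alt dicts
instance (dicts : List (List (String × String))) (out : Bool) : Decidable (Spec_checkDictKeys dicts out) := by unfold Spec_checkDictKeys; infer_instance

-- ===== CLAIM (what is proved, stated in full; the proofs are below) =====
def Claim_equal_checkDictKeys : Prop := ∀ (dicts : List (List (String × String))), Dom_checkDictKeys dicts → Spec_checkDictKeys dicts (checkDictKeys dicts)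

-- ===== LEMMAS AND PROOFS =====

-- the foldl-append in A just builds the map
theorem pv_foldl_keys (dicts : List (List (String × String))) (acc : List (PySem.Set String)) :
    dicts.foldl (fun acc d => acc ++ [pvKeysOf d]) acc = acc ++ dicts.map pvKeysOf := by
  induction dicts generalizing acc with
  | nil => simp
  | cons d rest ih => simp [ih]

-- the early-return loop ↔ an all-quantifier
theorem pv_loopA_iff (k0 : PySem.Set String) (ks : List (PySem.Set String)) :
    pvLoopA k0 ks = true ↔ ∀ k ∈ ks, PySem.Set.equal k0 k = true := by
  induction ks with
  | nil => simp [pvLoopA]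
  | cons k rest ih =>
    constructor
    · intro h
      have hb : PySem.Set.equal k0 k = true := by
        by_contra hc
        have hb' : PySem.Set.equal k0 k = false := Bool.eq_false_iff.2 hc
        simp only [pvLoopA, hb', Bool.not_false, if_true] at h
        exact Bool.false_ne_true h
      have hrest : pvLoopA k0 rest = true := by
        simp only [pvLoopA, hb, Bool.not_true] at h
        simpa using h
      intro k' hk'
      rcases List.mem_cons.1 hk' with rfl | hk''
      · exact hb
      · exact ih.1 hrest k' hk''
    · intro h
      have hb := h k (by simp)
      simp only [pvLoopA, hb, Bool.not_true]
      simpa using ih.2 (fun k' hk' => h k' (List.mem_cons_of_mem _ hk'))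

-- set equality of key sets ↔ equality of the canonical (sorted) representatives
theorem pv_equal_iff_frozen (d e : List (String × String)) :
    PySem.Set.equal (pvKeysOf d) (pvKeysOf e) = true ↔ pvFrozenKeys d = pvFrozenKeys e := by
  rw [PySem.Set.equal_iff]
  constructor
  · intro h
    have hperm : (pvKeysOf d).Perm (pvKeysOf e) :=
      (List.perm_ext_iff_of_nodup (PySem.Set.nodup_ofList _) (PySem.Set.nodup_ofList _)).2 h
    exact PySem.List.sorted_eq_sorted_of_perm _ _ _ (fun a b hab => hab) hperm
  · intro h x
    have hd : x ∈ pvKeysOf d ↔ x ∈ pvFrozenKeys d := (PySem.List.mem_sorted _ _ _ _).symm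
    have he : x ∈ pvKeysOf e ↔ x ∈ pvFrozenKeys e := (PySem.List.mem_sorted _ _ _ _).symm
    rw [hd, he, h]

-- set(x :: xs) has at most one element iff every element of xs equals x
theorem pv_len_le_one {α : Type} [BEq α] [LawfulBEq α] (x : α) (xs : List α) :
    (PySem.Set.len (PySem.Set.ofList (x :: xs)) ≤ 1) ↔ ∀ y ∈ xs, y = x := by
  have hlen : PySem.Set.len (PySem.Set.ofList (x :: xs))
      = ((PySem.Set.ofList (x :: xs)).length : Int) := rfl
  rw [hlen]
  constructor
  · intro h y hy
    have hx : x ∈ PySem.Set.ofList (x :: xs) := (PySem.Set.mem_ofList _ _).2 (by simp)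
    have hym : y ∈ PySem.Set.ofList (x :: xs) := (PySem.Set.mem_ofList _ _).2 (by simp [hy])
    have h1 : (PySem.Set.ofList (x :: xs)).length = 1 := by
      have : 0 < (PySem.Set.ofList (x :: xs)).length := List.length_pos_of_mem hx
      omega
    rcases List.length_eq_one_iff.1 h1 with ⟨a, ha⟩
    rw [ha] at hx hym
    simp at hx hym
    rw [hym, hx]
  · intro h
    have hmem : ∀ y ∈ PySem.Set.ofList (x :: xs), y = x := by
      intro y hy
      rcases List.mem_cons.1 ((PySem.Set.mem_ofList _ _).1 hy) with rfl | hmem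
      · rfl
      · exact h y hmem
    have hnd := PySem.Set.nodup_ofList (x :: xs)
    rcases hl : PySem.Set.ofList (x :: xs) with _ | ⟨a, rest⟩
    · simp
    · rw [hl] at hmem hnd
      rcases rest with _ | ⟨b, t⟩
      · simp
      · exfalso
        have ha : a = x := hmem a (by simp)
        have hb : b = x := hmem b (by simp)
        have : a ≠ b := by intro hab; rw [hab] at hnd; simp at hnd
        exact this (ha.trans hb.symm)

-- ===== VERDICT (by name: the statement is the Claim_ definition above) =====
theorem checkDictKeys_spec : Claim_equal_checkDictKeys := by
  intro dicts _
  show checkDictKeys dicts = checkDictKeys_alt dicts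
  cases dicts with
  | nil => rfl
  | cons d rest =>
    rw [Bool.eq_iff_iff]
    unfold checkDictKeys checkDictKeys_alt
    rw [pv_foldl_keys]
    simp only [List.nil_append, List.map_cons]
    show pvLoopA (pvKeysOf d) (pvKeysOf d :: rest.map pvKeysOf) = true ↔ _
    rw [pv_loopA_iff, decide_eq_true_eq, pv_len_le_one]
    constructor
    · intro h y hy
      rcases List.mem_map.1 hy with ⟨e, he, rfl⟩
      exact ((pv_equal_iff_frozen d e).1
        (h _ (List.mem_cons_of_mem _ (List.mem_map.2 ⟨e, he, rfl⟩)))).symm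
    · intro h k hk
      rcases List.mem_cons.1 hk with rfl | hk'
      · exact (pv_equal_iff_frozen d d).2 rfl
      · rcases List.mem_map.1 hk' with ⟨e, he, rfl⟩
        exact (pv_equal_iff_frozen d e).2 (h _ (List.mem_map.2 ⟨e, he, rfl⟩)).symm
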